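-- pv_equiv track=rewrite | github.com/bodra84/algorithms-templates | python/sprint1_Final/B_sleight of hand.py | sleight_hand
-- ===== SOURCE A (Python) =====
-- def sleight_hand(k, data):
--     """
--     Функция вычисления количества баллов, заработанных при оновременном нажатии
--     на 2*к клавиш в поле исходных данных data.
--     """
--     keys = {'1': 0, '2': 0, '3': 0, '4': 0, '5': 0,
--             '6': 0, '7': 0, '8': 0, '9': 0}
--     result = 0
--     for char in data:
--         if char in keys:
--             keys[char] += 1
--     for value in keys.values():
--         if value <= (k + k) and value != 0:
--             result += 1
--     return result
-- ===== SOURCE B (Python) =====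
-- def sleight_hand(k, data):
--     """
--     Extract-and-remove scoring: keep only the digit keys, then repeatedly take
--     the first remaining digit, delete all of its occurrences by filtering, and
--     score that digit when the number removed is at most 2*k (it is never zero).
--     No frequency table is built.
--     """
--     s = [c for c in data if '1' <= c <= '9']
--     result = 0
--     while s:
--         d = s[0]
--         before = len(s)
--         s = [c for c in s if c != d]
--         removed = before - len(s)
--         if removed <= k + k:
--             result += 1
--     return result
-- ===== Notes on version B (the rewrite author's own statement) =====
-- stated objective: alternative
-- what changed: Replaces the one-pass frequency-table tally with an extract-and-remove loop: filter data down to digit keys, then repeatedly take the first remaining digit, delete all its occurrences by list filtering and score the removed count against 2*k, so no counts table is ever built or iterated.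
import Mathlib
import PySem

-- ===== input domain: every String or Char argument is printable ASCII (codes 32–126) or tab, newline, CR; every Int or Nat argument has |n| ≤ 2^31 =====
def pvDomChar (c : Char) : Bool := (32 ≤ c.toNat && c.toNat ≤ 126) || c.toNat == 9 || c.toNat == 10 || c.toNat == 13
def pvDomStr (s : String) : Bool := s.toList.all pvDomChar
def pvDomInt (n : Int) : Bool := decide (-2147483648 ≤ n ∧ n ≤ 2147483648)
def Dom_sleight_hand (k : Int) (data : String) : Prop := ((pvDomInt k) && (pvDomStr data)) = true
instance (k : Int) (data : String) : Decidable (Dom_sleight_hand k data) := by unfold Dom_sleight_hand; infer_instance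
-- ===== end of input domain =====

-- B replaces A's one-pass frequency table with an extract-and-remove loop over the
-- filtered digit list (alternative decomposition; no frequency table is built).

-- ===== PORT A =====
def sleight_hand (k : Int) (data : String) : Int :=
  let keys : PySem.Dict Char Int :=
    PySem.Dict.ofList [('1',0),('2',0),('3',0),('4',0),('5',0),('6',0),('7',0),('8',0),('9',0)]
  let keys := data.toList.foldl
    (fun d char => if d.contains char then d.modify char 0 (· + 1) else d) keys
  keys.values.foldl (fun result value => if value ≤ (k + k) ∧ value ≠ 0 then result + 1 else result) 0

-- ===== PORT B =====
-- B's while loop: pop all occurrences of the first remaining digit, score the removed count.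
def sleightLoop (k : Int) (result : Int) : List Char → Int
  | [] => result
  | d :: t =>
      let before := (d :: t).length
      let s' := (d :: t).filter (fun c => !(c == d))
      let removed : Int := (before : Int) - (s'.length : Int)
      sleightLoop k (if removed ≤ k + k then result + 1 else result) s'
termination_by l => l.length
decreasing_by
  simp only [List.filter_cons, BEq.rfl, Bool.not_true, List.length_cons]
  exact Nat.lt_succ_of_le (List.length_filter_le _ _)

def sleight_hand_alt (k : Int) (data : String) : Int :=
  let s := data.toList.filter (fun c => decide ('1' ≤ c ∧ c ≤ '9'))
  sleightLoop k 0 s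

-- ===== PRECONDITION & SPEC =====
def Spec_sleight_hand (k : Int) (data : String) (out : Int) : Prop := out = sleight_hand_alt k data
instance (k : Int) (data : String) (out : Int) : Decidable (Spec_sleight_hand k data out) := by unfold Spec_sleight_hand; infer_instance

-- ===== CLAIM (what is proved, stated in full; the proofs are below) =====
def Claim_equal_sleight_hand : Prop := ∀ (k : Int) (data : String), Dom_sleight_hand k data → Spec_sleight_hand k data (sleight_hand k data)

-- ===== LEMMAS AND PROOFS =====

-- The nine digit keys, and the scoring predicate "count is nonzero and at most 2k".
def pvDigits : List Char := ['1','2','3','4','5','6','7','8','9']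

def pvQ (k : Int) (l : List Char) (d : Char) : Bool :=
  decide (0 < l.count d ∧ ((l.count d : Int)) ≤ k + k)

-- One step of A's loop on the literal nine-key dict bumps the matching entry.
lemma stepA_mem (a1 a2 a3 a4 a5 a6 a7 a8 a9 : Int) (x : Char)
    (hx : x ∈ pvDigits) :
    (if (PySem.Dict.mk [('1',a1),('2',a2),('3',a3),('4',a4),('5',a5),('6',a6),('7',a7),('8',a8),('9',a9)] : PySem.Dict Char Int).contains x
      then (PySem.Dict.mk [('1',a1),('2',a2),('3',a3),('4',a4),('5',a5),('6',a6),('7',a7),('8',a8),('9',a9)] : PySem.Dict Char Int).modify x 0 (· + 1)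
      else PySem.Dict.mk [('1',a1),('2',a2),('3',a3),('4',a4),('5',a5),('6',a6),('7',a7),('8',a8),('9',a9)]) =
    PySem.Dict.mk (([('1',a1),('2',a2),('3',a3),('4',a4),('5',a5),('6',a6),('7',a7),('8',a8),('9',a9)] : List (Char × Int)).map
      (fun p => if p.1 = x then (p.1, p.2 + 1) else p)) := by
  fin_cases hx <;>
    simp [PySem.Dict.contains, PySem.Dict.modify, PySem.Dict.insert, PySem.Dict.getD,
      PySem.Dict.get?]

-- The A-side loop over data turns the literal nine-key dict into the nine per-digit counts.
lemma loopA (l : List Char) : ∀ (a1 a2 a3 a4 a5 a6 a7 a8 a9 : Int),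
    l.foldl (fun d char => if d.contains char then d.modify char 0 (· + 1) else d)
      (PySem.Dict.mk [('1',a1),('2',a2),('3',a3),('4',a4),('5',a5),('6',a6),('7',a7),('8',a8),('9',a9)]) =
    PySem.Dict.mk [('1', a1 + l.count '1'), ('2', a2 + l.count '2'), ('3', a3 + l.count '3'),
      ('4', a4 + l.count '4'), ('5', a5 + l.count '5'), ('6', a6 + l.count '6'),
      ('7', a7 + l.count '7'), ('8', a8 + l.count '8'), ('9', a9 + l.count '9')] := by
  induction l with
  | nil => intro a1 a2 a3 a4 a5 a6 a7 a8 a9; simp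
  | cons x t ih =>
    intro a1 a2 a3 a4 a5 a6 a7 a8 a9
    by_cases hx : x ∈ pvDigits
    · rw [List.foldl_cons, stepA_mem a1 a2 a3 a4 a5 a6 a7 a8 a9 x hx]
      fin_cases hx <;>
      · simp
        rw [ih]
        simp
        omega
    · have h1 : ¬ (PySem.Dict.mk [('1',a1),('2',a2),('3',a3),('4',a4),('5',a5),('6',a6),('7',a7),('8',a8),('9',a9)] : PySem.Dict Char Int).contains x := by
        simp [PySem.Dict.contains, pvDigits] at hx ⊢
        tauto
      simp only [List.foldl_cons, if_neg h1]
      rw [ih]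
      simp [pvDigits] at hx
      simp only [List.count_cons]
      obtain ⟨h1, h2, h3, h4, h5, h6, h7, h8, h9⟩ := hx
      simp
      exact ⟨h1, h2, h3, h4, h5, h6, h7, h8, h9⟩

-- A's scoring fold over the list of counts equals the countP of the scoring predicate.
lemma foldA_countP (k : Int) (l : List Char) : ∀ (ds : List Char) (r : Int),
    (ds.map (fun d => ((l.count d : Int)))).foldl
      (fun result value => if value ≤ (k + k) ∧ value ≠ 0 then result + 1 else result) r =
    r + (ds.countP (pvQ k l) : Int) := by
  intro ds
  induction ds with
  | nil => intro r; simp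
  | cons d t ih =>
    intro r
    rw [List.map_cons, List.foldl_cons, ih, List.countP_cons]
    have hiff : (((l.count d : Int)) ≤ k + k ∧ ((l.count d : Int)) ≠ 0) ↔ (pvQ k l d = true) := by
      simp only [pvQ, decide_eq_true_iff]
      omega
    by_cases hq : pvQ k l d = true
    · rw [if_pos (hiff.mpr hq), hq]
      simp
      omega
    · rw [if_neg (fun hc => hq (hiff.mp hc))]
      have hz : (if pvQ k l d = true then 1 else 0) = 0 := by simp [hq]
      rw [hz]
      push_cast
      ring

-- Splitting one element out of a countP over a nodup list.
lemma countP_split (D : List Char) (hD : D.Nodup) (d : Char) (hd : d ∈ D)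
    (p p' : Char → Bool) (h0 : p' d = false) (hagree : ∀ x, x ≠ d → p x = p' x) :
    D.countP p = D.countP p' + (if p d then 1 else 0) := by
  induction D with
  | nil => simp at hd
  | cons x t ih =>
    rcases List.nodup_cons.mp hD with ⟨hxt, htn⟩
    rcases List.mem_cons.mp hd with h | h
    · -- head is d
      have ht : t.countP p = t.countP p' := by
        apply List.countP_congr
        intro a ha
        have hne : a ≠ d := fun he => hxt (h ▸ he ▸ ha)
        simp [hagree a hne]
      rw [List.countP_cons, List.countP_cons, ht, ← h, h0]
      simp
    · have hx : x ≠ d := fun he => hxt (he ▸ h)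
      rw [List.countP_cons, List.countP_cons, ih htn h, hagree x hx]
      omega

-- After removing every occurrence of d, d's count is zero and other counts are unchanged.
lemma count_filter_ne (l : List Char) (d x : Char) (hx : x ≠ d) :
    (l.filter (fun c => !(c == d))).count x = l.count x :=
  List.count_filter (by simp [hx])

lemma count_filter_self (l : List Char) (d : Char) :
    (l.filter (fun c => !(c == d))).count d = 0 := by
  rw [List.count_eq_zero]
  intro h
  have := (List.mem_filter.mp h).2
  simp at this

-- The removed amount in one step of B's loop is the head's count.
lemma removed_eq_count (l : List Char) (d : Char) :
    ((l.length : Int)) - ((l.filter (fun c => !(c == d))).length : Int) = (l.count d : Int) := by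
  have h : ∀ (m : List Char), m.countP (fun c => c == d) + m.countP (fun c => !(c == d)) = m.length := by
    intro m
    induction m with
    | nil => simp
    | cons x t ih =>
      rw [List.countP_cons, List.countP_cons, List.length_cons]
      by_cases hx : (x == d) = true
      · rw [if_pos hx, if_neg (by simp [hx])]
        omega
      · rw [if_neg hx, if_pos (by simp_all)]
        omega
  have h2 : (l.filter (fun c => !(c == d))).length = l.countP (fun c => !(c == d)) :=
    List.countP_eq_length_filter.symm
  have h3 : l.count d = l.countP (fun c => c == d) := List.count_eq_countP
  have := h l
  omega

-- B's loop computes the countP of the scoring predicate over the nine digits.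
lemma sleightLoop_eq (k : Int) : ∀ (n : Nat) (l : List Char), l.length ≤ n →
    (∀ c ∈ l, c ∈ pvDigits) → ∀ (r : Int),
    sleightLoop k r l = r + (pvDigits.countP (pvQ k l) : Int) := by
  intro n
  induction n with
  | zero =>
    intro l hl _ r
    have : l = [] := List.eq_nil_of_length_eq_zero (Nat.le_zero.mp hl)
    subst this
    rw [sleightLoop]
    have : pvDigits.countP (pvQ k []) = 0 := by
      apply List.countP_eq_zero.mpr
      intro a _
      simp [pvQ]
    simp [this]
  | succ n ih =>
    intro l hl hmem r
    cases l with
    | nil =>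
      rw [sleightLoop]
      have : pvDigits.countP (pvQ k []) = 0 := by
        apply List.countP_eq_zero.mpr
        intro a _
        simp [pvQ]
      simp [this]
    | cons d t =>
      rw [sleightLoop]
      have hd : d ∈ d :: t := List.mem_cons_self ..
      simp only [removed_eq_count (d :: t) d]
      set l' := (d :: t).filter (fun c => !(c == d)) with hl'
      have hlen : l'.length ≤ n := by
        have : l'.length < (d :: t).length := by
          rw [hl']
          simp only [List.filter_cons, BEq.rfl, Bool.not_true, List.length_cons]
          exact Nat.lt_succ_of_le (List.length_filter_le _ _)
        omega
      have hmem' : ∀ c ∈ l', c ∈ pvDigits := fun c hc =>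
        hmem c (List.mem_of_mem_filter hc)
      rw [ih l' hlen hmem']
      have hsplit : pvDigits.countP (pvQ k (d :: t)) =
          pvDigits.countP (pvQ k l') + (if pvQ k (d :: t) d then 1 else 0) := by
        apply countP_split pvDigits (by decide) d (hmem d hd)
        · simp [pvQ, hl', count_filter_self]
        · intro x hx
          simp only [pvQ, hl', count_filter_ne (d :: t) d x hx]
      have hpos : 0 < (d :: t).count d := List.count_pos_iff.mpr hd
      rw [hsplit]
      by_cases hc : (((d :: t).count d : Int)) ≤ k + k
      · have hqt : pvQ k (d :: t) d = true := by
          simp only [pvQ, decide_eq_true_iff]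
          exact ⟨hpos, hc⟩
        rw [if_pos hc, hqt]
        simp
        omega
      · have hqf : pvQ k (d :: t) d = false := by
          simp only [pvQ, decide_eq_false_iff_not]
          exact fun hh => hc hh.2
        rw [if_neg hc]
        have hz : (if pvQ k (d :: t) d = true then 1 else 0) = 0 := by simp [hqf]
        rw [hz]
        push_cast
        ring

-- A character between '1' and '9' is one of the nine digit keys.
lemma char_range_mem (c : Char) (h1 : '1' ≤ c) (h2 : c ≤ '9') : c ∈ pvDigits := by
  rw [Char.le_def] at h1 h2
  have h1' : 49 ≤ c.val.toNat := UInt32.le_iff_toNat_le.mp h1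
  have h2' : c.val.toNat ≤ 57 := UInt32.le_iff_toNat_le.mp h2
  have hn : c.val.toNat = 49 ∨ c.val.toNat = 50 ∨ c.val.toNat = 51 ∨ c.val.toNat = 52 ∨
      c.val.toNat = 53 ∨ c.val.toNat = 54 ∨ c.val.toNat = 55 ∨ c.val.toNat = 56 ∨
      c.val.toNat = 57 := by omega
  have hc : c = '1' ∨ c = '2' ∨ c = '3' ∨ c = '4' ∨ c = '5' ∨ c = '6' ∨ c = '7' ∨ c = '8' ∨
      c = '9' := by
    rcases hn with h|h|h|h|h|h|h|h|h
    · exact Or.inl (Char.ext (UInt32.toNat_inj.mp (by rw [h]; rfl)))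
    · exact Or.inr (Or.inl (Char.ext (UInt32.toNat_inj.mp (by rw [h]; rfl))))
    · exact Or.inr (Or.inr (Or.inl (Char.ext (UInt32.toNat_inj.mp (by rw [h]; rfl)))))
    · exact Or.inr (Or.inr (Or.inr (Or.inl (Char.ext (UInt32.toNat_inj.mp (by rw [h]; rfl))))))
    · exact Or.inr (Or.inr (Or.inr (Or.inr (Or.inl (Char.ext (UInt32.toNat_inj.mp (by rw [h]; rfl)))))))
    · exact Or.inr (Or.inr (Or.inr (Or.inr (Or.inr (Or.inl (Char.ext (UInt32.toNat_inj.mp (by rw [h]; rfl))))))))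
    · exact Or.inr (Or.inr (Or.inr (Or.inr (Or.inr (Or.inr (Or.inl (Char.ext (UInt32.toNat_inj.mp (by rw [h]; rfl)))))))))
    · exact Or.inr (Or.inr (Or.inr (Or.inr (Or.inr (Or.inr (Or.inr (Or.inl (Char.ext (UInt32.toNat_inj.mp (by rw [h]; rfl))))))))))
    · exact Or.inr (Or.inr (Or.inr (Or.inr (Or.inr (Or.inr (Or.inr (Or.inr (Char.ext (UInt32.toNat_inj.mp (by rw [h]; rfl))))))))))
  rcases hc with h|h|h|h|h|h|h|h|h <;> subst h <;> decide

-- Counts of the nine digits are unchanged by B's initial digit filter.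
lemma count_digit_filter (l : List Char) (d : Char) (hd : d ∈ pvDigits) :
    (l.filter (fun c => decide ('1' ≤ c ∧ c ≤ '9'))).count d = l.count d := by
  apply List.count_filter
  fin_cases hd <;> decide

-- ===== VERDICT (by name: the statement is the Claim_ definition above) =====
theorem sleight_hand_spec : Claim_equal_sleight_hand := by
  intro k data _
  unfold Spec_sleight_hand sleight_hand sleight_hand_alt
  have hof : (PySem.Dict.ofList [('1',(0:Int)),('2',0),('3',0),('4',0),('5',0),('6',0),('7',0),('8',0),('9',0)]) =
      PySem.Dict.mk [('1',(0:Int)),('2',0),('3',0),('4',0),('5',0),('6',0),('7',0),('8',0),('9',0)] := by decide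
  simp only [hof, loopA]
  set l := data.toList with hl
  set s := l.filter (fun c => decide ('1' ≤ c ∧ c ≤ '9')) with hs
  have hvals : (PySem.Dict.mk [('1', (0:Int) + l.count '1'), ('2', 0 + l.count '2'),
      ('3', 0 + l.count '3'), ('4', 0 + l.count '4'), ('5', 0 + l.count '5'),
      ('6', 0 + l.count '6'), ('7', 0 + l.count '7'), ('8', 0 + l.count '8'),
      ('9', 0 + l.count '9')]).values =
      pvDigits.map (fun d => ((l.count d : Int))) := by
    simp [PySem.Dict.values, pvDigits]
  rw [hvals, foldA_countP]
  have hmem : ∀ c ∈ s, c ∈ pvDigits := by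
    intro c hc
    have hcr := (List.mem_filter.mp hc).2
    rw [decide_eq_true_iff] at hcr
    exact char_range_mem c hcr.1 hcr.2
  rw [sleightLoop_eq k s.length s le_rfl hmem 0]
  have hcong : pvDigits.countP (pvQ k l) = pvDigits.countP (pvQ k s) := by
    apply List.countP_congr
    intro d hd
    rw [hs]
    simp only [pvQ, count_digit_filter l d hd]
  rw [hcong]
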